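-- pv_equiv track=rewrite | github.com/pypi-data/pypi-mirror-319 | packages/UzbekLemma/UzbekLemma-1.2-py3-none-any.whl/UzbekLemma/UzbekLemma.py | verb_suffix
-- ===== SOURCE A (Python) =====
-- def verb_suffix(suffixes):
--     # Finding verb suffuxes
--     verb_suffixes = [['di', 'moqda', 'adi', 'ma', 'mas'], #bulishli-bulishsiz
--                      ['gan', 'r', 'ar', 'yotgan', 'ayotgan', 'ydigan', 'adigan', 'uvchi'], #sifatdosh
--                      ['b', 'ib', 'gani', 'guncha', 'gach', 'gancha', 'a'], #ravishdosh
--                      ['moq', 'mak', 'ish', 'uv'], #harakat_nomi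
--                      ['sa', 'moqchi'], #mayl
--                      ['di', 'gan', 'b', 'ib', 'yap', 'moqda', 'yotir', 'ayotir', 'yotib', 'ayotib', 'y', 'ay', 'r', 'ar', 'ur', 'gusi', 'gay'] #zamon
--                      ]
--     k = 0
--     for v_s in verb_suffixes:
--         for suffix in v_s:
--             if len(suffixes) >= len(suffix):
--                 tf = True
--                 for i in range(len(suffix)):
--                     if suffix[i] != suffixes[i]:
--                         tf = False
--                 if tf:
--                     suffixes = suffixes[len(suffix):]
--                     k += 1
--
--     shaxs_son = ['k', 'man', 'san', 'siz', 'di', 'dilar', 'y', 'ay', 'ylik', 'aylik', 'gin', 'sin', 'sinlar']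
--     for ss in shaxs_son:
--         if len(suffixes) >= len(ss) and suffixes.startswith(ss) and suffixes[len(ss):] == '':
--             k += 1
--
--     if k == 0:
--         return False
--     else:
--         return True
-- ===== SOURCE B (Python) =====
-- def verb_suffix(suffixes):
--     verb_flat = ('di', 'moqda', 'adi', 'ma', 'mas',
--                  'gan', 'r', 'ar', 'yotgan', 'ayotgan', 'ydigan', 'adigan', 'uvchi',
--                  'b', 'ib', 'gani', 'guncha', 'gach', 'gancha', 'a',
--                  'moq', 'mak', 'ish', 'uv',
--                  'sa', 'moqchi',
--                  'di', 'gan', 'b', 'ib', 'yap', 'moqda', 'yotir', 'ayotir', 'yotib',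
--                  'ayotib', 'y', 'ay', 'r', 'ar', 'ur', 'gusi', 'gay')
--     shaxs_son = ('k', 'man', 'san', 'siz', 'di', 'dilar', 'y', 'ay', 'ylik',
--                  'aylik', 'gin', 'sin', 'sinlar')
--     return any(suffixes.startswith(s) for s in verb_flat) or suffixes in shaxs_son
-- ===== Notes on version B (the rewrite author's own statement) =====
-- stated objective: simpler
-- what changed: Replaced A's nested stateful stripping/counting loops (character-by-character compare, string mutation, a counter k used only as zero/nonzero) by a single flat existence check: the input starts with some verb suffix or equals some shaxs_son entry.
import Mathlib
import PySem

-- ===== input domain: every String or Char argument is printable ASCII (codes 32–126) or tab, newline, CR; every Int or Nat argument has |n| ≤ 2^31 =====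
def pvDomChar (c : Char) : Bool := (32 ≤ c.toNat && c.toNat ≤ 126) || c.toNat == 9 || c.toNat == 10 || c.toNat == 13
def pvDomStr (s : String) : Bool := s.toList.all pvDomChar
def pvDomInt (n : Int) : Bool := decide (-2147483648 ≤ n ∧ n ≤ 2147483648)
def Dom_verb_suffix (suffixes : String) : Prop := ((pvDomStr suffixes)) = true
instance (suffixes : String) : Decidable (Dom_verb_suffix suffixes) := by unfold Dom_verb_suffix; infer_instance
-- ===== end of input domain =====

-- B replaces A's nested stateful stripping/counting loops by one flat existence check
-- (some verb suffix is a prefix of the input, or the input equals a shaxs_son entry); objective: simpler.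

-- ===== PORT A =====
def pvVerbGroups : List (List String) :=
  [["di", "moqda", "adi", "ma", "mas"],
   ["gan", "r", "ar", "yotgan", "ayotgan", "ydigan", "adigan", "uvchi"],
   ["b", "ib", "gani", "guncha", "gach", "gancha", "a"],
   ["moq", "mak", "ish", "uv"],
   ["sa", "moqchi"],
   ["di", "gan", "b", "ib", "yap", "moqda", "yotir", "ayotir", "yotib", "ayotib", "y", "ay", "r", "ar", "ur", "gusi", "gay"]]

def pvShaxsSon : List String :=
  ["k", "man", "san", "siz", "di", "dilar", "y", "ay", "ylik", "aylik", "gin", "sin", "sinlar"]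

-- the inner 'tf' loop: for i in range(len(suffix)): if suffix[i] != suffixes[i]: tf = False
def pvTf (suffix s : String) : Bool :=
  (PySem.List.pyRange 0 (PySem.Str.len suffix) 1).foldl
    (fun tf i => if PySem.Str.pyGet? suffix i ≠ PySem.Str.pyGet? s i then false else tf) true

-- one iteration of the inner 'for suffix in v_s' loop, state = (suffixes, k)
def pvStep (st : String × Int) (suffix : String) : String × Int :=
  if PySem.Str.len st.1 ≥ PySem.Str.len suffix then
    if pvTf suffix st.1 then
      (PySem.Str.slice st.1 (some (PySem.Str.len suffix)) none, st.2 + 1)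
    else st
  else st

-- the shaxs_son loop over the state left by the verb-suffix loops
def pvShaxsLoop (st : String × Int) : Int :=
  pvShaxsSon.foldl
    (fun k ss =>
      if (decide (PySem.Str.len st.1 ≥ PySem.Str.len ss) && PySem.Str.startswith st.1 ss
            && (PySem.Str.slice st.1 (some (PySem.Str.len ss)) none == "")) = true
      then k + 1 else k) st.2

def verb_suffix (suffixes : String) : Bool :=
  if pvShaxsLoop (pvVerbGroups.foldl (fun st v_s => v_s.foldl pvStep st) (suffixes, (0 : Int))) = 0
  then false else true

-- ===== PORT B =====
def pvVerbFlat : List String :=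
  ["di", "moqda", "adi", "ma", "mas",
   "gan", "r", "ar", "yotgan", "ayotgan", "ydigan", "adigan", "uvchi",
   "b", "ib", "gani", "guncha", "gach", "gancha", "a",
   "moq", "mak", "ish", "uv",
   "sa", "moqchi",
   "di", "gan", "b", "ib", "yap", "moqda", "yotir", "ayotir", "yotib",
   "ayotib", "y", "ay", "r", "ar", "ur", "gusi", "gay"]

def pvShaxsSonAlt : List String :=
  ["k", "man", "san", "siz", "di", "dilar", "y", "ay", "ylik", "aylik", "gin", "sin", "sinlar"]

def verb_suffix_alt (suffixes : String) : Bool :=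
  pvVerbFlat.any (fun s => PySem.Str.startswith suffixes s)
    || pvShaxsSonAlt.any (fun ss => suffixes == ss)

-- ===== PRECONDITION & SPEC =====
def Spec_verb_suffix (suffixes : String) (out : Bool) : Prop := out = verb_suffix_alt suffixes
instance (suffixes : String) (out : Bool) : Decidable (Spec_verb_suffix suffixes out) := by unfold Spec_verb_suffix; infer_instance

-- ===== CLAIM (what is proved, stated in full; the proofs are below) =====
def Claim_equal_verb_suffix : Prop := ∀ (suffixes : String), Dom_verb_suffix suffixes → Spec_verb_suffix suffixes (verb_suffix suffixes)

-- ===== LEMMAS AND PROOFS =====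

-- a loop that can only set the flag to false computes 'all'
theorem pv_foldl_if_false {α : Type} (l : List α) (p : α → Prop) [DecidablePred p] (init : Bool) :
    l.foldl (fun tf i => if p i then false else tf) init = (init && l.all (fun i => !(decide (p i)))) := by
  induction l generalizing init with
  | nil => simp
  | cons x t ih =>
    simp only [List.foldl_cons, List.all_cons, ih]
    by_cases hp : p x <;> simp [hp]

theorem pv_prefix_of_pointwise (l₁ l₂ : List Char)
    (he : ∀ i, i < l₁.length → l₁[i]? = l₂[i]?) : l₁ <+: l₂ := by
  rw [List.prefix_iff_eq_take]
  apply List.ext_getElem?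
  intro i
  by_cases hi : i < l₁.length
  · rw [he i hi, List.getElem?_take]; simp [hi]
  · simp only [List.getElem?_eq_none (le_of_not_gt hi), List.getElem?_take]
    split
    · omega
    · rfl

-- the Python guard + tf loop IS startswith
theorem pvTf_characterisation (x s : String) :
    (decide (PySem.Str.len s ≥ PySem.Str.len x) && pvTf x s) = PySem.Chars.startswith s.toList x.toList := by
  by_cases hpre : x.toList <+: s.toList
  · have hsw : PySem.Chars.startswith s.toList x.toList = true :=
      (PySem.Chars.startswith_iff _ _).mpr hpre
    rw [hsw]
    have hlen : x.toList.length ≤ s.toList.length := hpre.length_le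
    have hget : ∀ i, i < x.toList.length → x.toList[i]? = s.toList[i]? := by
      intro i hi
      obtain ⟨t, ht⟩ := hpre
      rw [← ht, List.getElem?_append_left hi]
    simp only [Bool.and_eq_true, decide_eq_true_eq]
    constructor
    · simp only [ge_iff_le, PySem.Str.len_eq]; omega
    · unfold pvTf
      rw [pv_foldl_if_false, Bool.true_and, List.all_eq_true]
      intro i hi
      rw [PySem.List.mem_pyRange_one] at hi
      have hlt : i.toNat < x.toList.length := by
        have h2 := hi.2; rw [PySem.Str.len_eq] at h2; omega
      have hcast : i = ((i.toNat : Nat) : Int) := by omega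
      rw [hcast]
      simp only [PySem.Str.pyGet?_natCast, Bool.not_eq_eq_eq_not, Bool.not_true,
        decide_eq_false_iff_not, not_not]
      exact hget i.toNat hlt
  · have hsw : PySem.Chars.startswith s.toList x.toList = false := by
      cases h : PySem.Chars.startswith s.toList x.toList
      · rfl
      · exact absurd ((PySem.Chars.startswith_iff _ _).mp h) hpre
    rw [hsw]
    by_cases hlen : x.toList.length ≤ s.toList.length
    · -- lengths fit but some character differs: tf must come out false
      rw [Bool.and_eq_false_iff]
      right
      cases htf : pvTf x s
      · rfl
      · exfalso
        apply hpre
        apply pv_prefix_of_pointwise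
        intro i hi
        unfold pvTf at htf
        rw [pv_foldl_if_false, Bool.true_and, List.all_eq_true] at htf
        have hmem : (i : Int) ∈ PySem.List.pyRange 0 (PySem.Str.len x) 1 := by
          rw [PySem.List.mem_pyRange_one, PySem.Str.len_eq]; omega
        have h3 := htf _ hmem
        simp only [Bool.not_eq_eq_eq_not, Bool.not_true, decide_eq_false_iff_not, not_not,
          PySem.Str.pyGet?_natCast] at h3
        exact_mod_cast h3
    · rw [Bool.and_eq_false_iff]
      left
      simp only [ge_iff_le, PySem.Str.len_eq, decide_eq_false_iff_not, Int.ofNat_le]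
      omega

theorem pvStep_eq (st : String × Int) (x : String) :
    pvStep st x = if PySem.Chars.startswith st.1.toList x.toList then
        (PySem.Str.slice st.1 (some (PySem.Str.len x)) none, st.2 + 1) else st := by
  have h := pvTf_characterisation x st.1
  unfold pvStep
  cases hsw : PySem.Chars.startswith st.1.toList x.toList
  · rw [hsw] at h
    rcases Bool.and_eq_false_iff.mp h with hd | htf
    · rw [if_neg (by simpa using hd), if_neg Bool.false_ne_true]
    · by_cases hg : PySem.Str.len st.1 ≥ PySem.Str.len x
      · rw [if_pos hg, if_neg (by simp [htf]), if_neg Bool.false_ne_true]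
      · rw [if_neg hg, if_neg Bool.false_ne_true]
  · rw [hsw] at h
    have hd : PySem.Str.len st.1 ≥ PySem.Str.len x ∧ pvTf x st.1 = true := by
      simpa using h
    rw [if_pos hd.1, if_pos hd.2, if_pos rfl]

-- k never decreases through the verb-suffix loop
theorem pv_foldl_pvStep_pos (l : List String) (st : String × Int) (h : 0 < st.2) :
    0 < (l.foldl pvStep st).2 := by
  induction l generalizing st with
  | nil => exact h
  | cons x t ih =>
    rw [List.foldl_cons]
    apply ih
    rw [pvStep_eq]
    split
    · simp only []; omega
    · exact h

-- either no suffix in l is a prefix of s and the state is untouched, or k ended positive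
theorem pv_foldl_pvStep_zero (l : List String) (s : String) :
    (l.foldl pvStep (s, 0) = (s, 0) ∧ ∀ x ∈ l, PySem.Chars.startswith s.toList x.toList = false)
    ∨ (0 < (l.foldl pvStep (s, 0)).2 ∧ ∃ x ∈ l, PySem.Chars.startswith s.toList x.toList = true) := by
  induction l with
  | nil => left; simp
  | cons x t ih =>
    rw [List.foldl_cons, pvStep_eq]
    cases hx : PySem.Chars.startswith s.toList x.toList
    · rw [if_neg Bool.false_ne_true]
      rcases ih with ⟨h1, h2⟩ | ⟨h1, y, hy, hsw⟩
      · left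
        exact ⟨h1, by
          intro z hz
          rcases List.mem_cons.mp hz with rfl | hz
          · exact hx
          · exact h2 z hz⟩
      · right
        exact ⟨h1, y, List.mem_cons_of_mem _ hy, hsw⟩
    · rw [if_pos rfl]
      right
      constructor
      · exact pv_foldl_pvStep_pos _ _ (by simp only []; omega)
      · exact ⟨x, List.mem_cons_self, hx⟩

-- the shaxs_son test (length guard + startswith + empty remainder) is exact string equality
theorem pv_shaxs_cond_eq (s ss : String) :
    (decide (PySem.Str.len s ≥ PySem.Str.len ss) && PySem.Str.startswith s ss
      && (PySem.Str.slice s (some (PySem.Str.len ss)) none == "")) = (s == ss) := by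
  by_cases h : s = ss
  · subst h
    have h3 : PySem.Str.slice s (some (PySem.Str.len s)) none = "" := by
      rw [← String.toList_inj, PySem.Str.toList_slice]
      simp [PySem.Str.len_eq, PySem.List.slice_from_natCast]
    have h1 : decide (PySem.Str.len s ≥ PySem.Str.len s) = true := by simp
    have h2 : PySem.Str.startswith s s = true := by
      rw [PySem.Str.startswith_eq]
      exact (PySem.Chars.startswith_iff _ _).mpr (List.prefix_refl _)
    have h4 : (PySem.Str.slice s (some (PySem.Str.len s)) none == "") = true := by
      rw [h3]; rfl
    rw [h1, h2, h4]
    simp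
  · have hne : (s == ss) = false := by simp [h]
    rw [hne, Bool.and_eq_false_iff, Bool.and_eq_false_iff]
    by_cases hsw : ss.toList <+: s.toList
    · by_cases hlen : s.toList.length ≤ ss.toList.length
      · exact absurd (String.toList_inj.mp (List.IsPrefix.eq_of_length_le hsw hlen).symm) h
      · right
        rw [beq_eq_false_iff_ne]
        intro hsl
        apply hlen
        have h4 : (PySem.Str.slice s (some (PySem.Str.len ss)) none).toList = ("" : String).toList := by
          rw [hsl]
        rw [PySem.Str.toList_slice] at h4
        simp only [PySem.Chars.slice_eq_listSlice, PySem.Str.len_eq,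
          PySem.List.slice_from_natCast] at h4
        have := List.drop_eq_nil_iff.mp h4
        omega
    · left; right
      rw [PySem.Str.startswith_eq]
      cases hc : PySem.Chars.startswith s.toList ss.toList
      · rfl
      · exact absurd ((PySem.Chars.startswith_iff _ _).mp hc) hsw

theorem pv_shaxs_lists_eq : pvShaxsSonAlt = pvShaxsSon := rfl

-- the shaxs loop counts the entries equal to the current string
theorem pvShaxsLoop_eq (st : String × Int) :
    pvShaxsLoop st = st.2 + (pvShaxsSon.countP (fun ss => st.1 == ss) : Int) := by
  unfold pvShaxsLoop
  rw [PySem.List.foldl_congr_mem pvShaxsSon _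
    (fun k ss => if (fun ss => st.1 == ss) ss = true then k + 1 else k) st.2
    (by intro acc ss _; rw [pv_shaxs_cond_eq])]
  exact PySem.List.foldl_count_if (fun ss => st.1 == ss) pvShaxsSon st.2

-- ===== VERDICT (by name: the statement is the Claim_ definition above) =====
theorem verb_suffix_spec : Claim_equal_verb_suffix := by
  intro s _
  unfold Spec_verb_suffix verb_suffix verb_suffix_alt
  have hflat : pvVerbGroups.foldl (fun st v_s => v_s.foldl pvStep st) (s, (0:Int)) =
      pvVerbFlat.foldl pvStep (s, (0:Int)) := by
    rw [← List.foldl_flatten]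
    rfl
  rw [hflat, pvShaxsLoop_eq]
  rcases pv_foldl_pvStep_zero pvVerbFlat s with ⟨h1, h2⟩ | ⟨h1, x, hx, hsw⟩
  · rw [h1]
    simp only [zero_add]
    have hany : pvVerbFlat.any (fun x => PySem.Str.startswith s x) = false := by
      rw [List.any_eq_false]
      intro x hx
      rw [PySem.Str.startswith_eq, h2 x hx]
      exact Bool.false_ne_true
    rw [hany, Bool.false_or]
    cases hA : pvShaxsSonAlt.any (fun ss => s == ss)
    · have hc : pvShaxsSon.countP (fun ss => s == ss) = 0 := by
        rw [List.countP_eq_zero]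
        rw [pv_shaxs_lists_eq] at hA
        exact List.any_eq_false.mp hA
      simp [hc]
    · have hc : 0 < pvShaxsSon.countP (fun ss => s == ss) := by
        rw [List.countP_pos_iff]
        rw [pv_shaxs_lists_eq] at hA
        exact List.any_eq_true.mp hA
      have hk : ((pvShaxsSon.countP (fun ss => s == ss) : Nat) : Int) ≠ 0 := by
        omega
      rw [if_neg hk]
  · have hk : (pvVerbFlat.foldl pvStep (s, 0)).2
        + (pvShaxsSon.countP (fun ss => (pvVerbFlat.foldl pvStep (s, 0)).1 == ss) : Int) ≠ 0 := by
      have hc : (0:Int) ≤ (pvShaxsSon.countP (fun ss => (pvVerbFlat.foldl pvStep (s, 0)).1 == ss) : Int) :=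
        Int.natCast_nonneg _
      omega
    rw [if_neg hk]
    have hany : pvVerbFlat.any (fun x => PySem.Str.startswith s x) = true := by
      rw [List.any_eq_true]
      exact ⟨x, hx, by rw [PySem.Str.startswith_eq]; exact hsw⟩
    rw [hany, Bool.true_or]
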